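-- pv_equiv track=rewrite | github.com/ClaudiuCreanga/data-science | random_exercises/ex1.py | bonetrousle2
-- ===== SOURCE A (Python) =====
-- def bonetrousle2(n, k, b):
--     init = b * (b + 1) // 2
--     extra = (n - init) // b + 1
--     over = init + extra * b - n
--     answer = list(range(1, b + 1))
--     answer = [i + extra - 1 for i in answer[:over]] + [i + extra for i in answer[over:]]
--     if answer[-1] <= k and answer[0] >= 1:
--         return answer
--     else:
--         return [-1]
-- ===== SOURCE B (Python) =====
-- def bonetrousle2(n, k, b):
--     # Greedy from the largest stick down: at each step the current largest stick is
--     # the smallest v such that the i remaining distinct sticks v, v-1, ..., v-i+1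
--     # can still reach the remaining sum m, i.e. v = ceil((m + i*(i-1)/2) / i).
--     sticks = []
--     m = n
--     for i in range(b, 0, -1):
--         v = -(-(m + i * (i - 1) // 2) // i)
--         sticks.append(v)
--         m -= v
--     sticks.reverse()
--     if sticks[-1] <= k and sticks[0] >= 1:
--         return sticks
--     else:
--         return [-1]
-- ===== Notes on version B (the rewrite author's own statement) =====
-- stated objective: alternative
-- what changed: B replaces A's closed-form offset/skip construction (compute extra and over globally, then concatenate two shifted slice-comprehensions) by a per-stick greedy loop: it walks i = b..1 choosing each largest remaining stick as the ceiling division v = ceil((m + i*(i-1)/2)/i) of the remaining sum m and subtracting it, never computing extra or over at all.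
import Mathlib
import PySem

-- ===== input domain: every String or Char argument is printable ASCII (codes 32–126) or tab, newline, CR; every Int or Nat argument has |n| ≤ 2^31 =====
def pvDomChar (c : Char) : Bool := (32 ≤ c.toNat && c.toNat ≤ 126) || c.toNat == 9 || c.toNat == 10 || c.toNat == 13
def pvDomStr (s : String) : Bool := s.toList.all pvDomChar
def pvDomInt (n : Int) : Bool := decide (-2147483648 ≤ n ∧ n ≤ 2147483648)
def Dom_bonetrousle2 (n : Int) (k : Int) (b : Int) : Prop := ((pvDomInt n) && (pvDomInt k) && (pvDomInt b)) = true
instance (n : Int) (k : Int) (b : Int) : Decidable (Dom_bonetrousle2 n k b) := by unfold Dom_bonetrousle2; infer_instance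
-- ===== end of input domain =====

-- B replaces A's closed-form offset/skip construction by a per-stick greedy loop
-- (largest remaining stick = ceiling division of the remaining sum); objective: alternative.

-- ===== PORT A =====
def bonetrousle2 (n : Int) (k : Int) (b : Int) : List Int :=
  let init := PySem.Int.floordiv (b * (b + 1)) 2
  let extra := PySem.Int.floordiv (n - init) b + 1
  let ovr := init + extra * b - n
  let answer := PySem.List.pyRange 1 (b + 1) 1
  let answer := (PySem.List.slice answer none (some ovr)).map (fun i => i + extra - 1)
             ++ (PySem.List.slice answer (some ovr) none).map (fun i => i + extra)
  -- answer[-1] / answer[0]: IndexError (pyGet? = none) only on b ≤ 0, excluded by Pre_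
  if PySem.List.pyGetD answer (-1) 0 ≤ k ∧ 1 ≤ PySem.List.pyGetD answer 0 0
  then answer else [-1]

-- ===== PORT B =====
-- loop body: v = -(-(m + i*(i-1)//2) // i); sticks.append(v); m -= v.
-- Encoding: the appended list is accumulated in reverse (cons instead of append, the
-- standard efficient encoding), so Python's final sticks.reverse() is the identity
-- on this representation and sticks is res.2 directly.
def pvStep (s : Int × List Int) (i : Int) : Int × List Int :=
  let v := -(PySem.Int.floordiv (-(s.1 + PySem.Int.floordiv (i * (i - 1)) 2)) i)
  (s.1 - v, v :: s.2)

def bonetrousle2_alt (n : Int) (k : Int) (b : Int) : List Int :=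
  let res := (PySem.List.pyRange b 0 (-1)).foldl pvStep (n, [])
  let sticks := res.2
  -- sticks[-1] / sticks[0]: IndexError only on b ≤ 0, excluded by Pre_
  if PySem.List.pyGetD sticks (-1) 0 ≤ k ∧ 1 ≤ PySem.List.pyGetD sticks 0 0
  then sticks else [-1]

-- ===== PRECONDITION & SPEC =====
-- Pre_ excludes exactly b ≤ 0, where A raises (ZeroDivisionError at b = 0, IndexError on answer[-1] for b < 0).
def Pre_bonetrousle2 (n : Int) (k : Int) (b : Int) : Prop := 1 ≤ b
instance (n : Int) (k : Int) (b : Int) : Decidable (Pre_bonetrousle2 n k b) := by unfold Pre_bonetrousle2; infer_instance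
def pvWitness_bonetrousle2 : Int × Int × Int := (15, 10, 3)

def Spec_bonetrousle2 (n : Int) (k : Int) (b : Int) (out : List Int) : Prop := out = bonetrousle2_alt n k b
instance (n : Int) (k : Int) (b : Int) (out : List Int) : Decidable (Spec_bonetrousle2 n k b out) := by unfold Spec_bonetrousle2; infer_instance

-- ===== CLAIM (what is proved, stated in full; the proofs are below) =====
def Claim_equal_bonetrousle2 : Prop := ∀ (n : Int) (k : Int) (b : Int), Dom_bonetrousle2 n k b → Pre_bonetrousle2 n k b → Spec_bonetrousle2 n k b (bonetrousle2 n k b)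

-- ===== LEMMAS AND PROOFS =====

-- the common value of both programs' stick list, as two integer ranges
def pvBlock (q ovr j : Int) : List Int :=
  PySem.List.pyRange (q + 1) (q + 1 + min j ovr) 1 ++ PySem.List.pyRange (q + ovr + 2) (q + j + 2) 1

-- shifting an int range by a constant
theorem map_add_pyRange (a c t : Int) :
    (PySem.List.pyRange a c 1).map (fun i => i + t) = PySem.List.pyRange (a+t) (c+t) 1 := by
  rw [PySem.List.pyRange_one, PySem.List.pyRange_one, List.map_map]
  have h : (c + t - (a + t)).toNat = (c - a).toNat := by omega
  rw [h]
  apply List.map_congr_left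
  intro x _
  simp [Function.comp]
  ring

-- A's two shifted slices of range(1, b+1) are exactly the two ranges of pvBlock
theorem pvA_list_eq (extra ovr b : Int) (h1 : 1 ≤ ovr) (h2 : ovr ≤ b) :
    (PySem.List.slice (PySem.List.pyRange 1 (b+1) 1) none (some ovr)).map (fun i => i + extra - 1)
    ++ (PySem.List.slice (PySem.List.pyRange 1 (b+1) 1) (some ovr) none).map (fun i => i + extra)
    = pvBlock (extra - 1) ovr b := by
  have hsplit : PySem.List.pyRange 1 (b+1) 1
      = PySem.List.pyRange 1 (1+ovr) 1 ++ PySem.List.pyRange (1+ovr) (b+1) 1 :=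
    PySem.List.pyRange_one_append 1 (1+ovr) (b+1) (by omega) (by omega)
  have hlen : (PySem.List.pyRange 1 (1+ovr) 1).length = ovr.toNat := by
    rw [PySem.List.length_pyRange_one]; omega
  have htake : PySem.List.slice (PySem.List.pyRange 1 (b+1) 1) none (some ovr)
      = PySem.List.pyRange 1 (1+ovr) 1 := by
    rw [PySem.List.slice_to _ (by omega), hsplit, ← hlen, List.take_left]
  have hdrop : PySem.List.slice (PySem.List.pyRange 1 (b+1) 1) (some ovr) none
      = PySem.List.pyRange (1+ovr) (b+1) 1 := by
    rw [PySem.List.slice_from _ (by omega), hsplit, ← hlen, List.drop_left]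
  rw [htake, hdrop]
  have hl1 : (PySem.List.pyRange 1 (1+ovr) 1).map (fun i => i + extra - 1)
      = PySem.List.pyRange extra (extra+ovr) 1 := by
    have : (fun i : Int => i + extra - 1) = (fun i : Int => i + (extra - 1)) := by funext i; ring
    rw [this, map_add_pyRange]
    congr 1 <;> ring
  have hl2 : (PySem.List.pyRange (1+ovr) (b+1) 1).map (fun i => i + extra)
      = PySem.List.pyRange (extra+ovr+1) (extra+b+1) 1 := by
    rw [map_add_pyRange]; congr 1 <;> ring
  rw [hl1, hl2]
  unfold pvBlock
  rw [min_eq_right h2]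
  congr 1 <;> congr 1 <;> ring

-- appending the greedy value extends pvBlock by one
theorem pvBlock_snoc (q ovr j : Int) (hov : 1 ≤ ovr) (hj : 0 ≤ j) :
    pvBlock q ovr (j+1) = pvBlock q ovr j ++ [q + (j+1) + (if ovr < j+1 then 1 else 0)] := by
  unfold pvBlock
  by_cases hc : ovr < j + 1
  · rw [if_pos hc, min_eq_right (by omega), min_eq_right (by omega), List.append_assoc]
    congr 1
    have : q + (j+1) + 2 = (q + j + 2) + 1 := by ring
    rw [this, PySem.List.pyRange_one_succ_right (by omega)]
    congr 2
    ring
  · rw [if_neg hc, min_eq_left (by omega), min_eq_left (by omega)]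
    have h2 : PySem.List.pyRange (q + ovr + 2) (q + (j+1) + 2) 1 = [] :=
      PySem.List.pyRange_one_eq_nil (by omega)
    have h3 : PySem.List.pyRange (q + ovr + 2) (q + j + 2) 1 = [] :=
      PySem.List.pyRange_one_eq_nil (by omega)
    rw [h2, h3, List.append_nil, List.append_nil]
    have : q + 1 + (j + 1) = (q + 1 + j) + 1 := by ring
    rw [this, PySem.List.pyRange_one_succ_right (by omega)]
    congr 2
    ring

-- loop invariant of B's greedy fold: starting from the remaining sum of pvBlock's
-- first j elements, it appends exactly pvBlock's elements from the top down
theorem pv_loop (q ovr : Int) (hov : 1 ≤ ovr) :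
    ∀ (j : Nat) (t m : Int) (acc : List Int),
    2 * t = (j : Int) * ((j : Int) + 1) →
    m = t + q * (j : Int) + max ((j : Int) - ovr) 0 →
    (PySem.List.pyRange (j : Int) 0 (-1)).foldl pvStep (m, acc)
      = (0, pvBlock q ovr (j : Int) ++ acc) := by
  intro j
  induction j with
  | zero =>
    intro t m acc ht hm
    push_cast at ht hm ⊢
    rw [PySem.List.pyRange_neg_one_eq_nil (by omega), List.foldl_nil]
    unfold pvBlock
    rw [min_eq_left (by omega : (0:Int) ≤ ovr),
        PySem.List.pyRange_one_eq_nil (by omega), PySem.List.pyRange_one_eq_nil (by omega)]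
    rw [max_eq_right (by omega : (0:Int) - ovr ≤ 0)] at hm
    simp at hm ⊢
    omega
  | succ j ih =>
    intro t m acc ht hm
    push_cast at ht hm ⊢
    rw [PySem.List.pyRange_neg_one_cons (by omega), List.foldl_cons]
    have hfd : PySem.Int.floordiv (((j : Int) + 1) * (((j : Int) + 1) - 1)) 2
        = t - ((j : Int) + 1) := by
      rw [PySem.Int.floordiv_eq_iff_of_pos (by omega)]
      constructor <;> nlinarith [ht]
    have hv : -(PySem.Int.floordiv (-(m + (t - ((j : Int) + 1)))) ((j : Int) + 1))
        = q + ((j : Int) + 1) + (if ovr < (j : Int) + 1 then 1 else 0) := by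
      rw [PySem.Int.neg_floordiv_neg_eq_iff_of_pos (by omega)]
      by_cases hc : ovr < (j : Int) + 1
      · rw [if_pos hc]
        rw [max_eq_left (by omega : (0:Int) ≤ (j : Int) + 1 - ovr)] at hm
        constructor <;> nlinarith [ht, hm]
      · rw [if_neg hc]
        rw [max_eq_right (by omega : (j : Int) + 1 - ovr ≤ 0)] at hm
        constructor <;> nlinarith [ht, hm]
    set v := q + ((j : Int) + 1) + (if ovr < (j : Int) + 1 then 1 else 0) with hvdef
    have hstep : pvStep (m, acc) ((j : Int) + 1) = (m - v, v :: acc) := by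
      simp only [pvStep, hfd, hv]
    rw [hstep]
    have hc1 : (j : Int) + 1 - 1 = (j : Int) := by ring
    rw [hc1]
    have ht' : 2 * (t - ((j : Int) + 1)) = (j : Int) * ((j : Int) + 1) := by nlinarith [ht]
    have hm' : m - v = (t - ((j : Int) + 1)) + q * (j : Int) + max ((j : Int) - ovr) 0 := by
      by_cases hc : ovr < (j : Int) + 1
      · rw [hvdef, if_pos hc]
        rw [max_eq_left (by omega : (0:Int) ≤ (j : Int) + 1 - ovr)] at hm
        rw [max_eq_left (by omega : (0:Int) ≤ (j : Int) - ovr)]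
        linarith [hm]
      · rw [hvdef, if_neg hc]
        rw [max_eq_right (by omega : (j : Int) + 1 - ovr ≤ 0)] at hm
        rw [max_eq_right (by omega : (j : Int) - ovr ≤ 0)]
        linarith [hm]
    rw [ih (t - ((j : Int) + 1)) (m - v) (v :: acc) ht' hm']
    have hblk : pvBlock q ovr ((j : Int) + 1) = pvBlock q ovr (j : Int) ++ [v] :=
      pvBlock_snoc q ovr (j : Int) hov (by omega)
    rw [hblk, List.append_assoc]
    simp

-- floordiv (b*(b+1)) 2 doubles back to b*(b+1)
theorem pv_init_double (b : Int) : 2 * PySem.Int.floordiv (b * (b + 1)) 2 = b * (b + 1) := by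
  obtain ⟨r, hr⟩ := Int.even_mul_succ_self b
  have : PySem.Int.floordiv (b * (b + 1)) 2 = r := by
    rw [PySem.Int.floordiv_eq_iff_of_pos (by omega)]
    constructor <;> linarith [hr]
  rw [this]; linarith [hr]

theorem bonetrousle2_eq (n k b : Int) (hb : 1 ≤ b) : bonetrousle2 n k b = bonetrousle2_alt n k b := by
  simp only [bonetrousle2, bonetrousle2_alt]
  set init := PySem.Int.floordiv (b * (b + 1)) 2 with hinit
  set q := PySem.Int.floordiv (n - init) b with hq
  set ovr := init + (q + 1) * b - n with hovr
  have hb0 : (0:Int) < b := by omega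
  have hmul := PySem.Int.floordiv_mul_add_mod (n - init) b
  have hr0 := PySem.Int.mod_nonneg (n - init) hb0
  have hrb := PySem.Int.mod_lt (n - init) hb0
  rw [← hq] at hmul
  have hexp : (q + 1) * b = q * b + b := by ring
  have h1 : 1 ≤ ovr := by rw [hovr]; linarith [hmul, hr0, hrb, hexp]
  have h2 : ovr ≤ b := by rw [hovr]; linarith [hmul, hr0, hrb, hexp]
  have hA := pvA_list_eq (q + 1) ovr b h1 h2
  have hqe : q + 1 - 1 = q := by ring
  rw [hqe] at hA
  -- B side: the fold produces pvBlock reversed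
  have hdbl := pv_init_double b
  rw [← hinit] at hdbl
  have hbcast : b = ((b.toNat : Nat) : Int) := by omega
  have hmB : n = init + q * ((b.toNat : Nat) : Int) + max (((b.toNat : Nat) : Int) - ovr) 0 := by
    have hmx : max (((b.toNat : Nat) : Int) - ovr) 0 = ((b.toNat : Nat) : Int) - ovr := by omega
    rw [hmx, ← hbcast, hovr]; linarith [hmul, hexp]
  have htB : 2 * init = ((b.toNat : Nat) : Int) * (((b.toNat : Nat) : Int) + 1) := by
    rw [← hbcast]; exact hdbl
  have hloop := pv_loop q ovr h1 b.toNat init n [] htB hmB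
  rw [hbcast, hloop, ← hbcast]
  simp only [List.append_nil]
  rw [hA]

-- ===== VERDICT (by name: the statement is the Claim_ definition above) =====
theorem bonetrousle2_spec : Claim_equal_bonetrousle2 := by
  intro n k b _ hb
  unfold Spec_bonetrousle2
  exact bonetrousle2_eq n k b hb
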